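-- pv_equiv track=rewrite | github.com/bakunobu/exercise | 1400_basic_tasks/chap_6/6_62.py | del_a
-- ===== SOURCE A (Python) =====
-- def del_a(n:int, a:int) -> int:
--     new_num = 0
--     while n:
--         num = n % 10
--         if num == a:
--             pass
--         else:
--             new_num *= 10
--             new_num += num
--         n //= 10
--     return(new_num)
-- ===== SOURCE B (Python) =====
-- def del_a(n: int, a: int) -> int:
--     kept = [int(c) for c in str(n) if c != str(a)]
--     return sum(d * 10 ** i for i, d in enumerate(kept))
-- ===== Notes on version B (the rewrite author's own statement) =====
-- stated objective: alternative
-- what changed: B filters the decimal string of n most-significant-first and returns a positional weighted sum sum(d*10**i) over the kept digits (the kept MSB-first digits are the output's LSB-first digits), instead of A's LSB-first Horner accumulation via n % 10 / n //= 10.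
import Mathlib
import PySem

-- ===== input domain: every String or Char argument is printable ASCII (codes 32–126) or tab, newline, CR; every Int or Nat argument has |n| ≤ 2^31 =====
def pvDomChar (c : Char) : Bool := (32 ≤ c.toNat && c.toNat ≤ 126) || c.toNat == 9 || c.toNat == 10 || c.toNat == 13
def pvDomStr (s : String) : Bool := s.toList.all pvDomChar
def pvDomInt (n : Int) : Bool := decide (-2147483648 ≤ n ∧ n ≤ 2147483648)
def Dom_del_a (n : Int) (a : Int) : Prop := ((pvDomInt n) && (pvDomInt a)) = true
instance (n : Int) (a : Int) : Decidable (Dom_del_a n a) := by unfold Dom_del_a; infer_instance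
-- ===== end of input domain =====

-- B filters the decimal string of n most-significant-first and returns the positional weighted
-- sum Σ d_i * 10^i over the kept digits (no Horner accumulation, no digit reversal); Pre_
-- excludes negative n, on which A's while loop never terminates.


-- ===== PORT A =====
-- the 'n < 0' branch is only a totality guard: for n < 0 the Python loop never
-- terminates (n //= 10 stalls at -1), and such n are outside Pre_del_a
def del_a_loop (a : Int) (n : Int) (new_num : Int) : Int :=
  if _h0 : n = 0 then new_num
  else if _hneg : n < 0 then new_num
  else
    del_a_loop a (PySem.Int.floordiv n 10)
      (if PySem.Int.mod n 10 = a then new_num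
       else new_num * 10 + PySem.Int.mod n 10)
termination_by n.toNat
decreasing_by
  rw [PySem.Int.floordiv_eq_ediv_of_pos (by norm_num)]
  omega

def del_a (n : Int) (a : Int) : Int := del_a_loop a n 0

-- ===== PORT B =====
-- int(c) is ported as (PySem.Int.ofChars? [c]).getD 0: inside Pre_del_a every c is a
-- decimal digit of str(n), where int(c) returns (the default is never reached there).
def del_a_alt (n : Int) (a : Int) : Int :=
  let t := PySem.Int.toChars a
  let kept := ((PySem.Int.toChars n).filter (fun c => [c] ≠ t)).map
      (fun c => (PySem.Int.ofChars? [c]).getD 0)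
  ((PySem.List.enumerate kept).map (fun p => p.2 * 10 ^ p.1.toNat)).sum

-- ===== PRECONDITION & SPEC =====
-- Pre_ excludes negative n: there A diverges (never returns), so nothing is claimed.
def Pre_del_a (n : Int) (a : Int) : Prop := 0 ≤ n
instance (n : Int) (a : Int) : Decidable (Pre_del_a n a) := by unfold Pre_del_a; infer_instance
def pvWitness_del_a : Int × Int := (121, 1)
def Spec_del_a (n : Int) (a : Int) (out : Int) : Prop := out = del_a_alt n a
instance (n : Int) (a : Int) (out : Int) : Decidable (Spec_del_a n a out) := by unfold Spec_del_a; infer_instance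

-- ===== CLAIM (what is proved, stated in full; the proofs are below) =====
def Claim_equal_del_a : Prop := ∀ (n : Int) (a : Int), Dom_del_a n a → Pre_del_a n a → Spec_del_a n a (del_a n a)

-- ===== LEMMAS AND PROOFS =====

lemma pv_digitChar_ne_dash : ∀ d : Nat, d < 10 → Nat.digitChar d ≠ '-' := by decide

lemma pv_digitChar_inj : ∀ x : Nat, x < 10 → ∀ y : Nat, y < 10 →
    Nat.digitChar x = Nat.digitChar y → x = y := by decide

lemma pv_int_of_digitChar : ∀ d : Nat, d < 10 →
    (PySem.Int.ofChars? [Nat.digitChar d]).getD 0 = (d : Int) := by decide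

lemma pv_toDigitsCore_eq (fuel : Nat) : ∀ (m : Nat) (ds : List Char), 0 < m → m ≤ fuel →
    Nat.toDigitsCore 10 fuel m ds = ((Nat.digits 10 m).map Nat.digitChar).reverse ++ ds := by
  induction fuel with
  | zero => intro m ds h0 hf; omega
  | succ f ih =>
    intro m ds h0 hf
    by_cases hq : m / 10 = 0
    · rw [Nat.toDigitsCore, if_pos hq, Nat.digits_def' (by norm_num : (1:Nat) < 10) h0, hq]
      simp
    · rw [Nat.toDigitsCore, if_neg hq,
        ih (m / 10) _ (Nat.pos_of_ne_zero hq)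
          (by have := Nat.div_lt_self h0 (by norm_num : (1:Nat) < 10); omega),
        Nat.digits_def' (by norm_num : (1:Nat) < 10) h0]
      simp

lemma pv_toDigits_eq (m : Nat) (h : 0 < m) :
    Nat.toDigits 10 m = ((Nat.digits 10 m).map Nat.digitChar).reverse := by
  have := pv_toDigitsCore_eq (m + 1) m [] h (by omega)
  simpa [Nat.toDigits] using this

lemma pv_toChars_pos (n : Int) (h : 0 < n) :
    PySem.Int.toChars n = ((Nat.digits 10 n.toNat).map Nat.digitChar).reverse := by
  have hn : ¬ n < 0 := by omega
  rw [PySem.Int.toChars, if_neg hn, pv_toDigits_eq n.toNat (by omega)]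

lemma pv_toChars_singleton (a : Int) (ha0 : 0 ≤ a) (ha9 : a < 10) :
    PySem.Int.toChars a = [Nat.digitChar a.toNat] := by
  by_cases h0 : a = 0
  · subst h0; decide
  · have hn : ¬ a < 0 := by omega
    have hlt : a.toNat < 10 := by omega
    have hq : a.toNat / 10 = 0 := Nat.div_eq_of_lt hlt
    have hm : a.toNat % 10 = a.toNat := Nat.mod_eq_of_lt hlt
    rw [PySem.Int.toChars, if_neg hn, pv_toDigits_eq a.toNat (by omega),
      Nat.digits_def' (by norm_num : (1:Nat) < 10) (by omega), hq, hm]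
    simp

lemma pv_toChars_eq_singleton_iff (a : Int) (d : Nat) (hd : d < 10) :
    PySem.Int.toChars a = [Nat.digitChar d] ↔ a = (d : Int) := by
  by_cases hneg : a < 0
  · constructor
    · intro h
      rw [PySem.Int.toChars, if_pos hneg] at h
      injection h with h1 _
      exact absurd h1.symm (pv_digitChar_ne_dash d hd)
    · intro h; omega
  · by_cases hlt : a < 10
    · rw [pv_toChars_singleton a (by omega) hlt]
      constructor
      · intro h
        have hinj := pv_digitChar_inj a.toNat (by omega) d hd (by simpa using h)
        omega
      · intro h
        have : a.toNat = d := by omega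
        rw [this]
    · constructor
      · intro h
        rw [PySem.Int.toChars, if_neg hneg, pv_toDigits_eq a.toNat (by omega)] at h
        have hlen := congrArg List.length h
        simp at hlen
        have hd2 : Nat.digits 10 a.toNat =
            a.toNat % 10 :: Nat.digits 10 (a.toNat / 10) :=
          Nat.digits_def' (by norm_num : (1:Nat) < 10) (by omega)
        have hne2 : Nat.digits 10 (a.toNat / 10) ≠ [] := by
          rw [Nat.digits_ne_nil_iff_ne_zero]
          omega
        rw [hd2] at hlen
        simp at hlen
        exact absurd hlen hne2
      · intro h; omega

lemma pv_loopA_nat (a : Int) (m : Nat) : ∀ acc : Int,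
    del_a_loop a (m : Int) acc =
      (Nat.digits 10 m).foldl
        (fun (acc : Int) (d : Nat) => if (d : Int) = a then acc else acc * 10 + (d : Int)) acc := by
  induction m using Nat.strong_induction_on with
  | _ m ih =>
    intro acc
    rw [del_a_loop]
    by_cases h0 : m = 0
    · subst h0; simp
    · have hne : ¬ ((m : Int) = 0) := by omega
      have hnn : ¬ ((m : Int) < 0) := by omega
      rw [dif_neg hne, dif_neg hnn]
      have hmod : PySem.Int.mod (m : Int) 10 = ((m % 10 : Nat) : Int) := by
        rw [PySem.Int.mod_eq_emod_of_pos (by norm_num)]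
        omega
      have hdiv : PySem.Int.floordiv (m : Int) 10 = ((m / 10 : Nat) : Int) := by
        rw [PySem.Int.floordiv_eq_ediv_of_pos (by norm_num)]
        omega
      rw [hmod, hdiv, ih (m / 10) (Nat.div_lt_self (by omega) (by norm_num))]
      conv_rhs => rw [Nat.digits_def' (by norm_num : (1:Nat) < 10) (by omega : 0 < m)]
      rfl

-- shifting the enumeration start by 1 multiplies the positional sum by 10
lemma pv_sum_enum_shift (ys : List Int) : ∀ s : Nat,
    ((PySem.List.enumerate ys ((s : Int) + 1)).map (fun p => p.2 * 10 ^ p.1.toNat)).sum =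
      10 * ((PySem.List.enumerate ys (s : Int)).map (fun p => p.2 * 10 ^ p.1.toNat)).sum := by
  induction ys with
  | nil => intro s; simp [PySem.List.enumerate_nil]
  | cons y t ih =>
    intro s
    rw [PySem.List.enumerate_cons, PySem.List.enumerate_cons]
    have h1 : ((s : Int) + 1).toNat = s + 1 := by omega
    have h2 : ((s : Int) + 1 + 1) = (((s + 1 : Nat) : Int) + 1) := by push_cast; ring
    have h3 : (s : Int).toNat = s := by omega
    simp only [List.map_cons, List.sum_cons, h1, h2, h3, ih (s + 1)]
    push_cast
    ring

-- Horner evaluation of a LSB-first digit list equals the positional sum over its reversal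
lemma pv_horner_eq_sum (L : List Int) :
    L.foldl (fun acc d => acc * 10 + d) 0 =
      ((PySem.List.enumerate L.reverse).map (fun p => p.2 * 10 ^ p.1.toNat)).sum := by
  induction L using List.reverseRecOn with
  | nil => simp [PySem.List.enumerate_nil]
  | append_singleton M x ih =>
    rw [List.foldl_append, List.reverse_append]
    simp only [List.foldl_cons, List.foldl_nil, List.reverse_singleton, List.singleton_append]
    rw [PySem.List.enumerate_cons, List.map_cons, List.sum_cons]
    have h0 : ((0 : Int) + 1) = (((0 : Nat) : Int) + 1) := by norm_num
    rw [h0, pv_sum_enum_shift M.reverse 0, ih]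
    simp only [Nat.cast_zero, Int.toNat_zero, pow_zero, mul_one]
    ring

lemma pv_altB_pos (n a : Int) (h : 0 < n) :
    del_a_alt n a =
      (Nat.digits 10 n.toNat).foldl
        (fun (acc : Int) (d : Nat) => if (d : Int) = a then acc else acc * 10 + (d : Int)) 0 := by
  have hmem : ∀ d ∈ Nat.digits 10 n.toNat, d < 10 :=
    fun d hd => Nat.digits_lt_base (by norm_num) hd
  show ((PySem.List.enumerate
      (((PySem.Int.toChars n).filter (fun c => [c] ≠ PySem.Int.toChars a)).map
        (fun c => (PySem.Int.ofChars? [c]).getD 0))).map (fun p => p.2 * 10 ^ p.1.toNat)).sum = _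
  rw [pv_toChars_pos n h, List.filter_reverse, List.filter_map, List.map_reverse, List.map_map]
  have hfil : (Nat.digits 10 n.toNat).filter
        ((fun c => decide ([c] ≠ PySem.Int.toChars a)) ∘ Nat.digitChar) =
      (Nat.digits 10 n.toNat).filter (fun d : Nat => decide (¬ ((d : Int) = a))) := by
    apply List.filter_congr
    intro d hd
    have hd10 := hmem d hd
    simp only [Function.comp, decide_eq_decide]
    constructor
    · intro hne ha
      exact hne (((pv_toChars_eq_singleton_iff a d hd10).mpr ha.symm).symm)
    · intro hne hEq
      exact hne ((pv_toChars_eq_singleton_iff a d hd10).mp hEq.symm).symm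
  rw [hfil]
  have hmap : ((Nat.digits 10 n.toNat).filter (fun d : Nat => decide (¬ ((d : Int) = a)))).map
        ((fun c => (PySem.Int.ofChars? [c]).getD 0) ∘ Nat.digitChar) =
      ((Nat.digits 10 n.toNat).filter (fun d : Nat => decide (¬ ((d : Int) = a)))).map
        (Nat.cast : Nat → Int) := by
    apply List.map_congr_left
    intro d hd
    exact pv_int_of_digitChar d (hmem d (List.mem_of_mem_filter hd))
  rw [hmap, ← pv_horner_eq_sum, List.foldl_map, List.foldl_filter]
  apply PySem.List.foldl_congr_mem
  intro acc d _
  by_cases ha : (d : Int) = a <;> simp [ha]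

-- ===== VERDICT (by name: the statement is the Claim_ definition above) =====
theorem del_a_spec : Claim_equal_del_a := by
  intro n a _hdom hpre
  show del_a n a = del_a_alt n a
  by_cases h0 : n = 0
  · subst h0
    show del_a_loop a 0 0 = del_a_alt 0 a
    rw [del_a_loop]
    show (0 : Int) = ((PySem.List.enumerate
      ((((PySem.Int.toChars 0)).filter (fun c => [c] ≠ PySem.Int.toChars a)).map
        (fun c => (PySem.Int.ofChars? [c]).getD 0))).map (fun p => p.2 * 10 ^ p.1.toNat)).sum
    have h : PySem.Int.toChars 0 = ['0'] := by decide
    rw [h]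
    by_cases hc : ['0'] ≠ PySem.Int.toChars a
    · have hcb : decide (['0'] ≠ PySem.Int.toChars a) = true := decide_eq_true hc
      simp only [List.filter_cons, List.filter_nil, hcb, if_true, List.map_cons, List.map_nil,
        PySem.List.enumerate_cons, PySem.List.enumerate_nil, List.map_cons, List.map_nil,
        List.sum_cons, List.sum_nil]
      decide
    · simp [hc, PySem.List.enumerate_nil]
  · have hpos : 0 < n := by
      have h1 : (0 : Int) ≤ n := hpre
      omega
    show del_a_loop a n 0 = del_a_alt n a
    have hcast : ((n.toNat : Nat) : Int) = n := Int.toNat_of_nonneg (le_of_lt hpos)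
    rw [pv_altB_pos n a hpos]
    conv_lhs => rw [← hcast]
    rw [pv_loopA_nat a n.toNat 0]
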